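-- pv_equiv track=rewrite | github.com/Hackel15/Marquette-Projects | COSC 1002 (PYTHON)/Week_10/lab.py | search
-- ===== SOURCE A (Python) =====
-- def per():
--       values = ["A", "T", "C", "G"]
--       pers = []
--       for first in values:
--             for second in values:
--                   pers.append(first+second)
--       return pers
--
-- def search(line):
--       values = per()
--       dic = {}
--       lineArray = list(line)
--       for key in values:
--             dic[key] = 0
--
--       for index in range (0, len(lineArray)-1):
--             key = lineArray[index]+lineArray[index+1]
--             if key in values:
--                   dic[key] += 1
--       return dic
-- ===== SOURCE B (Python) =====
-- def search(line):
--       lineArray = list(line)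
--       pairs = [x + y for x, y in zip(lineArray, lineArray[1:])]
--       return {f + s: pairs.count(f + s) for f in "ATCG" for s in "ATCG"}
-- ===== Notes on version B (the rewrite author's own statement) =====
-- stated objective: simpler
-- what changed: A initialises all 16 keys to 0 and walks indices with a guarded in-place increment; B builds the list of all adjacent pairs via zip, then constructs the result dict in one projection step {p: pairs.count(p)} over the 16 valid keys, with no initialisation pass and no in-loop validity check.
import Mathlib
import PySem

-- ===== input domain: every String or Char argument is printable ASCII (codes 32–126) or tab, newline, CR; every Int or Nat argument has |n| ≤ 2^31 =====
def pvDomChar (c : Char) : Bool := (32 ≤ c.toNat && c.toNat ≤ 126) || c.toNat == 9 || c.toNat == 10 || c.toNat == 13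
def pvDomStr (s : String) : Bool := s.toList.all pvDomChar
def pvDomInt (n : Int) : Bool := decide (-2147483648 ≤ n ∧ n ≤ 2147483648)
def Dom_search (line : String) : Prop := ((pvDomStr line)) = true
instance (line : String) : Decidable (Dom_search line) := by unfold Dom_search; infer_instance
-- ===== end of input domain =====

-- B replaces A's initialise-then-guarded-increment index walk by counting the zip-adjacent
-- pairs and projecting onto the 16 valid keys; same cost, simpler code.

-- ===== PORT A =====
-- Python's 1-character strings "A","T","C","G" are modelled as Chars; '+' on two such
-- 1-char strings is String.ofList [a, b] — exact on this fixed alphabet.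
def per : List String :=
  let values : List Char := ['A', 'T', 'C', 'G']
  values.foldl (fun pers first =>
    values.foldl (fun pers second => pers ++ [String.ofList [first, second]]) pers) []

def search (line : String) : List (String × Int) :=
  let values := per
  let lineArray := line.toList
  let dic : PySem.Dict String Int :=
    values.foldl (fun d key => d.insert key 0) PySem.Dict.empty
  let dic := (PySem.List.pyRange 0 ((lineArray.length : Int) - 1) 1).foldl
    (fun d index =>
      -- index and index+1 are in range for every index of this range, so pyGetD is exact
      let key := String.ofList [PySem.List.pyGetD lineArray index ' ',
                            PySem.List.pyGetD lineArray (index + 1) ' ']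
      -- dic[key] += 1: key was initialised (key ∈ values), so the lookup cannot raise
      if key ∈ values then d.insert key (d.getD key 0 + 1) else d) dic
  dic.items

-- ===== PORT B =====
def search_alt (line : String) : List (String × Int) :=
  let lineArray := line.toList
  let pairs := (lineArray.zip (PySem.List.slice lineArray (some 1) none)).map
    (fun p => String.ofList [p.1, p.2])
  -- the dict comprehension's 16 keys are pairwise distinct, so the dict is this
  -- key/value list in comprehension order
  "ATCG".toList.flatMap (fun f => "ATCG".toList.map (fun s =>
    (String.ofList [f, s], (pairs.count (String.ofList [f, s]) : Int))))

-- ===== PRECONDITION & SPEC =====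
def Spec_search (line : String) (out : List (String × Int)) : Prop := out = search_alt line
instance (line : String) (out : List (String × Int)) : Decidable (Spec_search line out) := by unfold Spec_search; infer_instance

-- ===== CLAIM (what is proved, stated in full; the proofs are below) =====
def Claim_equal_search : Prop := ∀ (line : String), Dom_search line → Spec_search line (search line)

-- ===== LEMMAS AND PROOFS =====

-- the loop body of A, as a function of the key it reads
def stepA (d : PySem.Dict String Int) (key : String) : PySem.Dict String Int :=
  if key ∈ per then d.insert key (d.getD key 0 + 1) else d

-- a dict whose items are exactly the 16 keys of per, each mapped to f k
def dictOf (f : String → Int) : PySem.Dict String Int :=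
  per.foldl (fun d k => d.insert k (f k)) PySem.Dict.empty

theorem per_nodup : per.Nodup := by decide

theorem items_dictOf (f : String → Int) :
    (dictOf f).items = per.map (fun k => (k, f k)) := by
  have h := PySem.Dict.items_foldl_insert_fresh (l := per) (k := id) (v := f)
    (d := PySem.Dict.empty)
    (by intro a _; simp [PySem.Dict.contains_empty])
    (by simpa using per_nodup)
  simpa [dictOf] using h

theorem keys_dictOf (f : String → Int) : (dictOf f).keys = per := by
  simp [PySem.Dict.keys, items_dictOf, Function.comp_def]

theorem getD_dictOf (f : String → Int) {k : String} (hk : k ∈ per) :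
    (dictOf f).getD k 0 = f k := by
  apply PySem.Dict.getD_of_mem_items
  · rw [items_dictOf]; exact List.mem_map_of_mem hk
  · rw [keys_dictOf]; exact per_nodup

theorem stepA_not_mem (f : String → Int) {key : String} (h : key ∉ per) :
    stepA (dictOf f) key = dictOf f := by
  simp [stepA, h]

theorem stepA_mem (f : String → Int) {key : String} (h : key ∈ per) :
    stepA (dictOf f) key = dictOf (fun k => if k = key then f k + 1 else f k) := by
  apply PySem.Dict.ext
  have hcont : (dictOf f).contains key = true := by
    rw [PySem.Dict.contains_iff_mem_keys, keys_dictOf]; exact h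
  rw [stepA, if_pos h, PySem.Dict.items_insert_of_contains (dictOf f) _ hcont,
      getD_dictOf f h, items_dictOf, items_dictOf, List.map_map]
  apply List.map_congr_left
  intro k _
  by_cases hk : k = key
  · subst hk; simp
  · simp [hk, Function.comp]

theorem foldl_stepA (pairs : List String) :
    ∀ f : String → Int,
      (pairs.foldl stepA (dictOf f)).items
        = per.map (fun k => (k, f k + (pairs.count k : Int))) := by
  induction pairs with
  | nil => intro f; simp [items_dictOf]
  | cons p rest ih =>
    intro f
    by_cases hp : p ∈ per
    · rw [List.foldl_cons, stepA_mem f hp, ih]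
      apply List.map_congr_left
      intro k _
      by_cases hk : k = p
      · subst hk; simp; ring
      · simp [hk, Ne.symm hk]
    · rw [List.foldl_cons, stepA_not_mem f hp, ih]
      apply List.map_congr_left
      intro k hk
      have : p ≠ k := fun e => hp (e ▸ hk)
      simp [this]

-- the key A reads at index i equals the i-th zip pair
theorem rangeKeys_eq_zipKeys (l : List Char) :
    (PySem.List.pyRange 0 ((l.length : Int) - 1) 1).map
        (fun i => String.ofList [PySem.List.pyGetD l i ' ',
                             PySem.List.pyGetD l (i + 1) ' '])
      = (l.zip l.tail).map (fun p => String.ofList [p.1, p.2]) := by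
  apply List.ext_getElem
  · simp [PySem.List.length_pyRange_one, List.length_zip, List.length_tail]
  · intro k h1 h2
    have hlen : k < l.length - 1 := by
      simpa [List.length_zip, List.length_tail] using h2
    have hk1 : k < l.length := by omega
    have hk2 : k + 1 < l.length := by omega
    have hkr : k < (PySem.List.pyRange 0 ((l.length : Int) - 1) 1).length := by
      simpa using h1
    have hkz : k < (l.zip l.tail).length := by simpa using h2
    have hr : (PySem.List.pyRange 0 ((l.length : Int) - 1) 1)[k]'hkr = (k : Int) := by
      rw [PySem.List.getElem_pyRange_one]; simp
    simp only [List.getElem_map, hr]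
    have g1 : PySem.List.pyGetD l ((k : Int)) ' ' = l[k] := by
      rw [PySem.List.pyGetD_natCast]; exact List.getD_eq_getElem l ' ' hk1
    have g2 : PySem.List.pyGetD l ((k : Int) + 1) ' ' = l[k + 1] := by
      have : (k : Int) + 1 = ((k + 1 : Nat) : Int) := by push_cast; ring
      rw [this, PySem.List.pyGetD_natCast]; exact List.getD_eq_getElem l ' ' hk2
    rw [g1, g2]
    have hz : (l.zip l.tail)[k]'hkz = (l[k], l.tail[k]'(by simp [List.length_tail]; omega)) :=
      List.getElem_zip
    simp [hz, List.getElem_tail]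

theorem search_eq_map (line : String) :
    search line
      = per.map (fun k =>
          (k, (((line.toList.zip line.toList.tail).map
                  (fun p => String.ofList [p.1, p.2])).count k : Int))) := by
  simp only [search]
  have hinit : per.foldl (fun d key => d.insert key 0) PySem.Dict.empty
      = dictOf (fun _ => 0) := rfl
  rw [hinit]
  have hbody : (PySem.List.pyRange 0 ((line.toList.length : Int) - 1) 1).foldl
      (fun d index =>
        let key := String.ofList [PySem.List.pyGetD line.toList index ' ',
                              PySem.List.pyGetD line.toList (index + 1) ' ']
        if key ∈ per then d.insert key (d.getD key 0 + 1) else d)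
      (dictOf (fun _ => 0))
      = ((PySem.List.pyRange 0 ((line.toList.length : Int) - 1) 1).map
          (fun i => String.ofList [PySem.List.pyGetD line.toList i ' ',
                               PySem.List.pyGetD line.toList (i + 1) ' '])).foldl
          stepA (dictOf (fun _ => 0)) := by
    rw [List.foldl_map]; rfl
  rw [hbody, rangeKeys_eq_zipKeys, foldl_stepA]
  simp

theorem search_alt_eq_map (line : String) :
    search_alt line
      = per.map (fun k =>
          (k, (((line.toList.zip line.toList.tail).map
                  (fun p => String.ofList [p.1, p.2])).count k : Int))) := by
  show "ATCG".toList.flatMap (fun f => "ATCG".toList.map (fun s =>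
      (String.ofList [f, s],
        ((((line.toList.zip (PySem.List.slice line.toList (some 1) none))).map
            (fun p => String.ofList [p.1, p.2])).count (String.ofList [f, s]) : Int)))) = _
  rw [PySem.List.slice_from_one]
  have hper : per
      = "ATCG".toList.flatMap (fun f => "ATCG".toList.map (fun s => String.ofList [f, s])) := by
    decide
  rw [hper, List.map_flatMap]
  simp

-- ===== VERDICT (by name: the statement is the Claim_ definition above) =====
theorem search_spec : Claim_equal_search := by
  intro line _
  show search line = search_alt line
  rw [search_eq_map, search_alt_eq_map]
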